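-- pv_equiv track=rewrite | github.com/varunisrani/thinkaiback | scheduling/agents/assistant_director_agent.py | _calculate_hold_days
-- ===== SOURCE A (Python) =====
-- from typing import Dict, Any, List
--
-- def _calculate_hold_days(work_days: List[int]) -> List[int]:
--     """Calculate hold days when actor is on call but not working."""
--     if len(work_days) < 2:
--         return []
--
--     hold_days = []
--     work_days_sorted = sorted(work_days)
--
--     # Hold days are typically 1-2 days between work days
--     for i in range(1, len(work_days_sorted)):
--         gap = work_days_sorted[i] - work_days_sorted[i-1]
--         if gap == 2:  # One day gap = hold day
--             hold_days.append(work_days_sorted[i-1] + 1)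
--
--     return hold_days
-- ===== SOURCE B (Python) =====
-- def _calculate_hold_days(work_days):
--     """Calculate hold days when actor is on call but not working."""
--     ws = set(work_days)
--     return sorted(d + 1 for d in ws if d + 2 in ws and d + 1 not in ws)
-- ===== Notes on version B (the rewrite author's own statement) =====
-- stated objective: alternative
-- what changed: Replaces the sort-then-adjacent-pair gap scan with set-membership probing (a hold day h is one with h-1 and h+1 worked but not h) followed by a single sort of the hold days.
import Mathlib
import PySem

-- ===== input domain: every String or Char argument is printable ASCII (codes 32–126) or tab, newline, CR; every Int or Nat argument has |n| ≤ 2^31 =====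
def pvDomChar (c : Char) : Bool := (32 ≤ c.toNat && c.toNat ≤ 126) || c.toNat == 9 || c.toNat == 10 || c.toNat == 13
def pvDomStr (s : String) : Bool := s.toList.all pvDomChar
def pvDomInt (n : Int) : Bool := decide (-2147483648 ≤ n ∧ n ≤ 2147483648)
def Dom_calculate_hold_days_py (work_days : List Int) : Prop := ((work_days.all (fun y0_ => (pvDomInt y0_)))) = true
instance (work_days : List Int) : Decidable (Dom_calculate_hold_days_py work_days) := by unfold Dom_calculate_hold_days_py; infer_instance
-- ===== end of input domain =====

-- B replaces A's sort-then-adjacent-gap scan by set-membership probing (a hold day h has h-1 and h+1 worked but not h) plus a final sort.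

-- ===== PORT A =====
def calculate_hold_days_py (work_days : List Int) : List Int :=
  if work_days.length < 2 then []
  else
    let work_days_sorted := PySem.List.sorted work_days (fun x => x) false
    (PySem.List.pyRange 1 (work_days_sorted.length : Int) 1).foldl
      (fun hold_days i =>
        let gap := PySem.List.pyGetD work_days_sorted i 0 -
                   PySem.List.pyGetD work_days_sorted (i - 1) 0
        if gap = 2 then hold_days ++ [PySem.List.pyGetD work_days_sorted (i - 1) 0 + 1]
        else hold_days) []

-- ===== PORT B =====
def calculate_hold_days_py_alt (work_days : List Int) : List Int :=
  let ws : PySem.Set Int := PySem.Set.ofList work_days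
  PySem.List.sorted
    ((ws.filter (fun d => PySem.Set.contains ws (d + 2) && !PySem.Set.contains ws (d + 1))).map
      (fun d => d + 1))
    (fun x => x) false

-- ===== PRECONDITION & SPEC =====
def Spec_calculate_hold_days_py (work_days : List Int) (out : List Int) : Prop := out = calculate_hold_days_py_alt work_days
instance (work_days : List Int) (out : List Int) : Decidable (Spec_calculate_hold_days_py work_days out) := by unfold Spec_calculate_hold_days_py; infer_instance

-- ===== CLAIM (what is proved, stated in full; the proofs are below) =====
def Claim_equal_calculate_hold_days_py : Prop := ∀ (work_days : List Int), Dom_calculate_hold_days_py work_days → Spec_calculate_hold_days_py work_days (calculate_hold_days_py work_days)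

-- ===== LEMMAS AND PROOFS =====

-- A's adjacent-pair scan written as structural recursion on the sorted list.
def pairScan : List Int → List Int
  | [] => []
  | [_] => []
  | a :: b :: t => (if b - a = 2 then [a + 1] else []) ++ pairScan (b :: t)

-- the index form of A's loop body equals pairScan
theorem idx_eq_pairScan (s : List Int) :
    ((List.range (s.length - 1)).filter
        (fun k => decide (s.getD (k+1) 0 - s.getD k 0 = 2))).map
      (fun k => s.getD k 0 + 1) = pairScan s := by
  match s with
  | [] => simp [pairScan]
  | [a] => simp [pairScan]
  | a :: b :: t =>
    have ih := idx_eq_pairScan (b :: t)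
    simp only [List.length_cons]
    have hlen : (t.length + 1 + 1 - 1) = t.length + 1 := by omega
    rw [hlen, List.range_succ_eq_map]
    simp only [List.filter_cons, List.filter_map]
    by_cases hgap : b - a = 2
    · simp [pairScan, hgap, ← ih, List.map_map, Function.comp_def, Nat.succ_eq_add_one]
      rfl
    · simp [pairScan, hgap, ← ih, List.map_map, Function.comp_def, Nat.succ_eq_add_one]
      rfl

-- A's index fold over range(1, len(s)) equals pairScan on any list
theorem fold_eq_pairScan (s : List Int) :
    (PySem.List.pyRange 1 (s.length : Int) 1).foldl
      (fun hold_days i =>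
        if PySem.List.pyGetD s i 0 - PySem.List.pyGetD s (i - 1) 0 = 2 then
          hold_days ++ [PySem.List.pyGetD s (i - 1) 0 + 1]
        else hold_days) [] = pairScan s := by
  rw [PySem.List.foldl_append_ite]
  rw [PySem.List.pyRange_one]
  have h1 : ((s.length : Int) - 1).toNat = s.length - 1 := by omega
  rw [h1, List.filter_map, List.map_map]
  have h2 : ∀ k : Nat, PySem.List.pyGetD s (1 + (k:Int)) 0 = s.getD (k+1) 0 := by
    intro k
    have : (1 + (k:Int)) = ((k+1 : Nat) : Int) := by push_cast; ring
    rw [this, PySem.List.pyGetD_natCast]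
  have h3 : ∀ k : Nat, PySem.List.pyGetD s ((1 + (k:Int)) - 1) 0 = s.getD k 0 := by
    intro k
    have : (1 + (k:Int)) - 1 = ((k : Nat) : Int) := by norm_num
    rw [this, PySem.List.pyGetD_natCast]
  simp only [List.nil_append, Function.comp_def, h2, h3]
  exact idx_eq_pairScan s

-- membership characterisation of pairScan on a ≤-sorted list
theorem mem_pairScan : ∀ {s : List Int}, s.Pairwise (· ≤ ·) → ∀ x : Int,
    (x ∈ pairScan s ↔ (x - 1) ∈ s ∧ (x + 1) ∈ s ∧ x ∉ s)
  | [], _, x => by simp [pairScan]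
  | [a], _, x => by simp [pairScan]; omega
  | a :: b :: t, hs, x => by
    rw [List.pairwise_cons] at hs
    obtain ⟨ha, hs'⟩ := hs
    have hb : ∀ y ∈ t, b ≤ y := (List.pairwise_cons.mp hs').1
    have hab : a ≤ b := ha b (by simp)
    have ih := mem_pairScan hs' x
    simp only [List.mem_cons, not_or] at ih
    simp only [pairScan, List.mem_append, List.mem_cons, List.mem_ite_nil_right,
      List.not_mem_nil, or_false, not_or]
    constructor
    · rintro (⟨hgap, hx⟩ | hmem)
      · refine ⟨Or.inl (by omega), Or.inr (Or.inl (by omega)), by omega, by omega, fun hy => ?_⟩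
        have := hb x hy; omega
      · obtain ⟨h1, h2, h3⟩ := ih.mp hmem
        have hx1 : b ≤ x - 1 := by
          rcases h1 with h | h
          · omega
          · exact hb _ h
        exact ⟨Or.inr h1, Or.inr h2, by omega, h3.1, h3.2⟩
    · rintro ⟨h1, h2, hxa, hxb, hxt⟩
      have h2' : x + 1 = b ∨ x + 1 ∈ t := by
        rcases h2 with h | h
        · exfalso
          rcases h1 with h' | h' | h'
          · omega
          · omega
          · have := hb _ h'; omega
        · exact h
      rcases h1 with h | h | h
      · rcases h2' with hb2 | ht2
        · exact Or.inl ⟨by omega, by omega⟩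
        · have hble : b ≤ x + 1 := hb _ ht2
          have : b = a ∨ b = x + 1 := by omega
          rcases this with hba | hbx
          · exact Or.inr (ih.mpr ⟨Or.inl (by omega), Or.inr ht2, hxb, hxt⟩)
          · exact Or.inl ⟨by omega, by omega⟩
      · exact Or.inr (ih.mpr ⟨Or.inl h, h2', hxb, hxt⟩)
      · exact Or.inr (ih.mpr ⟨Or.inr h, h2', hxb, hxt⟩)

-- pairScan of a ≤-sorted list is strictly increasing
theorem pairScan_pairwise_lt : ∀ {s : List Int}, s.Pairwise (· ≤ ·) →
    (pairScan s).Pairwise (· < ·)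
  | [], _ => by simp [pairScan]
  | [_], _ => by simp [pairScan]
  | a :: b :: t, hs => by
    rw [List.pairwise_cons] at hs
    obtain ⟨ha, hs'⟩ := hs
    have ih := pairScan_pairwise_lt hs'
    simp only [pairScan]
    rw [List.pairwise_append]
    refine ⟨by split <;> simp, ih, ?_⟩
    intro x hx y hy
    obtain ⟨hgap, hx1⟩ : b - a = 2 ∧ x = a + 1 := by split at hx <;> simp_all
    have hy1 : b + 1 ≤ y := by
      obtain ⟨h1, _, _⟩ := (mem_pairScan hs' y).mp hy
      have hbt : ∀ m ∈ t, b ≤ m := (List.pairwise_cons.mp hs').1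
      rcases List.mem_cons.mp h1 with h | h
      · omega
      · have := hbt _ h; omega
    omega

-- membership of B's pre-sort hold list
theorem mem_holds (wd : List Int) (x : Int) :
    (x ∈ ((PySem.Set.ofList wd).filter
        (fun d => PySem.Set.contains (PySem.Set.ofList wd) (d + 2) &&
          !PySem.Set.contains (PySem.Set.ofList wd) (d + 1))).map (fun d => d + 1)) ↔
      ((x - 1) ∈ wd ∧ (x + 1) ∈ wd ∧ x ∉ wd) := by
  simp only [List.mem_map, List.mem_filter, Bool.and_eq_true, Bool.not_eq_true',
    ← Bool.not_eq_true, PySem.Set.contains_iff, PySem.Set.mem_ofList]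
  constructor
  · rintro ⟨d, ⟨h1, h2, h3⟩, rfl⟩
    exact ⟨by rwa [show d + 1 - 1 = d by ring], by rwa [show d + 1 + 1 = d + 2 by ring], h3⟩
  · rintro ⟨h1, h2, h3⟩
    exact ⟨x - 1, ⟨h1, by rwa [show x - 1 + 2 = x + 1 by ring],
      by rwa [show x - 1 + 1 = x by ring]⟩, by ring⟩

-- B equals pairScan of the sorted input
theorem alt_eq_pairScan (work_days : List Int) :
    calculate_hold_days_py_alt work_days =
      pairScan (PySem.List.sorted work_days (fun x => x) false) := by
  have hsp : (PySem.List.sorted work_days (fun x => x) false).Pairwise (· ≤ ·) := by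
    simpa using PySem.List.sorted_pairwise (xs := work_days) (key := fun x => x)
  have hmem_s : ∀ x : Int, x ∈ PySem.List.sorted work_days (fun x => x) false ↔ x ∈ work_days :=
    fun x => PySem.List.mem_sorted _ _ _ _
  unfold calculate_hold_days_py_alt
  apply PySem.List.sorted_eq_of_perm_of_pairwise_lt
  · apply (List.perm_ext_iff_of_nodup ?_ ?_).mpr
    · intro x
      rw [mem_pairScan hsp x, mem_holds]
      simp only [hmem_s]
    · exact (pairScan_pairwise_lt hsp).imp ne_of_lt
    · exact ((PySem.Set.nodup_ofList work_days).filter _).map (fun a b h => by omega)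
  · exact (pairScan_pairwise_lt hsp).imp (fun h => by simpa using h)

-- pairScan of a short list is empty
theorem pairScan_short {s : List Int} (h : s.length < 2) : pairScan s = [] := by
  match s, h with
  | [], _ => rfl
  | [a], _ => rfl

-- ===== VERDICT (by name: the statement is the Claim_ definition above) =====
theorem calculate_hold_days_py_spec : Claim_equal_calculate_hold_days_py := by
  intro work_days _
  unfold Spec_calculate_hold_days_py
  rw [alt_eq_pairScan]
  unfold calculate_hold_days_py
  split
  · rename_i h
    rw [pairScan_short (by rwa [PySem.List.length_sorted])]
  · exact fold_eq_pairScan _
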